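-- pv_equiv track=rewrite | github.com/isk02206/python | informatics/previous informatics/Informatics-2/series09/molecular_mass.py | molecularmass
-- ===== SOURCE A (Python) =====
-- def molecularmass(molecule, index):
--
--     list1= molecule.split('-')
--     atom = ''
--     num = ''
--     mass = 0
--
--     for x in list1:
--         for y in x:
--             if y.isalpha():
--                 atom += y
--             elif y.isdigit():
--                 num += y
--
--         if num:
--             mass += index[atom] * int(num)
--         else:
--             mass += index[atom]
--
--         atom = ''
--         num = ''
--
--     return mass
-- ===== SOURCE B (Python) =====
-- def molecularmass(molecule, index):
--     counts = {}
--     for token in molecule.split('-'):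
--         atom = ''.join(c for c in token if c.isalpha())
--         num = ''.join(c for c in token if c.isdigit())
--         counts[atom] = counts.get(atom, 0) + (int(num) if num else 1)
--     return sum(index[atom] * n for atom, n in counts.items())
-- ===== Notes on version B (the rewrite author's own statement) =====
-- stated objective: alternative
-- what changed: B separates counting from weighting: it first builds a frequency table counts[atom] over the tokens (letters filtered as the atom, digits as the count, default 1), then returns one weighted sum over that table, instead of A's single inline loop that concatenates characters and accumulates the mass per token.
import Mathlib
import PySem

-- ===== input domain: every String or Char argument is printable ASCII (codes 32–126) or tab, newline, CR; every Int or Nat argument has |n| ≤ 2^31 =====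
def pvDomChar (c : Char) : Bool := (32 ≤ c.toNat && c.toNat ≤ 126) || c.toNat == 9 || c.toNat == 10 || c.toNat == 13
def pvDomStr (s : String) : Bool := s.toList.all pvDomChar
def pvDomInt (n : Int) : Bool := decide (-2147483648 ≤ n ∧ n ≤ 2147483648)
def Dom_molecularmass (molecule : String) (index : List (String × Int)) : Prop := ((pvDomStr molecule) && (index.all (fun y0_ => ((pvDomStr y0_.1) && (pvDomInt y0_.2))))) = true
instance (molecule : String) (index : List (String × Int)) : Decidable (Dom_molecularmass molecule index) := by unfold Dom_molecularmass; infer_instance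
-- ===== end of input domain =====

-- B changes the decomposition: a frequency table over the tokens, then one weighted sum (same cost; no speed claim).

-- ===== PORT A =====
-- Python's index[atom] raises KeyError on a missing key; ported as getD 0, with Pre_ excluding exactly those inputs.
-- the body of A's outer for-loop (state = (atom, num, mass)), as a named helper
def pvStepA (index : List (String × Int)) (s : List Char × List Char × Int) (x : List Char) :
    List Char × List Char × Int :=
  let p := x.foldl (fun (p : List Char × List Char) y =>
    if PySem.Chars.isalpha y then (p.1 ++ [y], p.2)
    else if PySem.Chars.isdigit y then (p.1, p.2 ++ [y])
    else p) (s.1, s.2.1)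
  let mass :=
    if p.2 ≠ [] then
      s.2.2 + (PySem.Dict.mk index).getD (String.ofList p.1) 0 * (PySem.Int.ofChars? p.2).getD 0
    else
      s.2.2 + (PySem.Dict.mk index).getD (String.ofList p.1) 0
  (([] : List Char), ([] : List Char), mass)

def molecularmass (molecule : String) (index : List (String × Int)) : Int :=
  let list1 := PySem.Chars.splitOn molecule.toList ['-']
  (list1.foldl (pvStepA index) (([] : List Char), ([] : List Char), (0 : Int))).2.2

-- ===== PORT B =====
-- Python's index[atom] in the final sum raises KeyError on a missing key; ported as getD 0, excluded by Pre_.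
def molecularmass_alt (molecule : String) (index : List (String × Int)) : Int :=
  let counts := (PySem.Chars.splitOn molecule.toList ['-']).foldl
    (fun (counts : PySem.Dict String Int) token =>
      let atom := String.ofList (token.filter PySem.Chars.isalpha)
      let num := token.filter PySem.Chars.isdigit
      counts.insert atom (counts.getD atom 0 +
        (if num ≠ [] then (PySem.Int.ofChars? num).getD 0 else 1)))
    PySem.Dict.empty
  (counts.items.map (fun p => (PySem.Dict.mk index).getD p.1 0 * p.2)).sum

-- ===== PRECONDITION & SPEC =====
-- Pre_ excludes exactly the inputs on which Python A raises KeyError: some token whose letters,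
-- concatenated, are not a key of index (B raises KeyError on those inputs too).  Both ports use
-- getD 0 there, so the equivalence proof does not need Pre_; it only marks where the Pythons return.
def Pre_molecularmass (molecule : String) (index : List (String × Int)) : Prop :=
  ∀ t ∈ PySem.Chars.splitOn molecule.toList ['-'],
    (PySem.Dict.mk index).contains (String.ofList (t.filter PySem.Chars.isalpha)) = true

instance (molecule : String) (index : List (String × Int)) : Decidable (Pre_molecularmass molecule index) := by
  unfold Pre_molecularmass; infer_instance

def pvWitness_molecularmass : String × (List (String × Int)) := ("H2-O", [("H", 1), ("O", 16)])

def Spec_molecularmass (molecule : String) (index : List (String × Int)) (out : Int) : Prop := out = molecularmass_alt molecule index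
instance (molecule : String) (index : List (String × Int)) (out : Int) : Decidable (Spec_molecularmass molecule index out) := by unfold Spec_molecularmass; infer_instance

-- ===== CLAIM (what is proved, stated in full; the proofs are below) =====
def Claim_equal_molecularmass : Prop := ∀ (molecule : String) (index : List (String × Int)), Dom_molecularmass molecule index → Pre_molecularmass molecule index → Spec_molecularmass molecule index (molecularmass molecule index)

-- ===== LEMMAS AND PROOFS =====

-- the per-token contribution both programs add up
def pvTerm (index : List (String × Int)) (t : List Char) : Int :=
  (PySem.Dict.mk index).getD (String.ofList (t.filter PySem.Chars.isalpha)) 0 *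
  (if t.filter PySem.Chars.isdigit ≠ [] then (PySem.Int.ofChars? (t.filter PySem.Chars.isdigit)).getD 0 else 1)

theorem pv_alpha_not_digit (c : Char) (h : PySem.Chars.isalpha c = true) :
    PySem.Chars.isdigit c = false := by
  simp [PySem.Chars.isalpha, PySem.Chars.isupper, PySem.Chars.islower,
        PySem.Chars.isdigit, Char.le_def, UInt32.le_iff_toNat_le] at h ⊢
  rcases h with ⟨h1, h2⟩ | ⟨h1, h2⟩ <;> intro h3 <;> omega

theorem pv_inner (cs : List Char) : ∀ (a n : List Char),
    cs.foldl (fun (p : List Char × List Char) y =>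
      if PySem.Chars.isalpha y then (p.1 ++ [y], p.2)
      else if PySem.Chars.isdigit y then (p.1, p.2 ++ [y])
      else p) (a, n)
    = (a ++ cs.filter PySem.Chars.isalpha, n ++ cs.filter PySem.Chars.isdigit) := by
  induction cs with
  | nil => simp
  | cons c cs ih =>
    intro a n
    by_cases hA : PySem.Chars.isalpha c = true
    · simp [hA, pv_alpha_not_digit c hA, ih]
    · by_cases hD : PySem.Chars.isdigit c = true
      · simp [hA, hD, ih]
      · simp [hA, hD, ih]

theorem pv_A_step (index : List (String × Int)) (m : Int) (x : List Char) :
    pvStepA index (([] : List Char), ([] : List Char), m) x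
    = (([] : List Char), ([] : List Char), m + pvTerm index x) := by
  unfold pvStepA
  rw [pv_inner]
  by_cases h : x.filter PySem.Chars.isdigit ≠ []
  · simp [pvTerm, h]
  · simp only [ne_eq, not_not] at h
    simp [pvTerm, h]

theorem pv_A_sum (index : List (String × Int)) (l : List (List Char)) : ∀ (m : Int),
    (l.foldl (pvStepA index) (([] : List Char), ([] : List Char), m)).2.2
    = m + (l.map (pvTerm index)).sum := by
  induction l with
  | nil => intro m; simp
  | cons t l ih =>
    intro m
    rw [List.foldl_cons, pv_A_step, ih]
    simp [add_assoc]

theorem pv_sum_replace (f : String → Int) (items : List (String × Int)) (k : String) (v w : Int) :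
    ∀ (_hnd : (items.map Prod.fst).Nodup) (_hv : (k, v) ∈ items),
    ((items.map (fun p => if p.1 == k then (k, v + w) else p)).map (fun p => f p.1 * p.2)).sum
    = (items.map (fun p => f p.1 * p.2)).sum + f k * w := by
  induction items with
  | nil => intro _ hv; simp at hv
  | cons q items ih =>
    intro hnd hv
    rcases List.mem_cons.mp hv with rfl | htail
    · -- head is (k, v); the tail contains no key k, so the replacing map is the identity there
      have hk : k ∉ items.map Prod.fst := by
        simpa using (List.nodup_cons.mp hnd).1
      have hmap : items.map (fun p => if p.1 == k then (k, v + w) else p) = items := by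
        conv_rhs => rw [← List.map_id items]
        apply List.map_congr_left
        intro p hp
        have hne : p.1 ≠ k := fun h => hk (h ▸ List.mem_map_of_mem hp)
        simp [hne]
      rw [List.map_cons, List.map_cons, List.sum_cons, hmap]
      simp
      ring
    · -- k sits in the tail; the head is untouched
      have hk0 : q.1 ≠ k := fun h => (List.nodup_cons.mp hnd).1 (h ▸ List.mem_map_of_mem htail)
      have htl := ih (List.nodup_cons.mp hnd).2 htail
      simp only [List.map_cons, List.sum_cons]
      rw [if_neg (by simp [hk0]), htl]
      ring

theorem pv_sum_items_insert (f : String → Int) (d : PySem.Dict String Int)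
    (hnd : d.keys.Nodup) (k : String) (w : Int) :
    (((d.insert k (d.getD k 0 + w)).items).map (fun p => f p.1 * p.2)).sum
    = (d.items.map (fun p => f p.1 * p.2)).sum + f k * w := by
  by_cases hc : d.contains k
  · have hc' : (d.get? k).isSome := by
      rw [← PySem.Dict.contains_eq_isSome_get?]; exact hc
    obtain ⟨v, hg⟩ := Option.isSome_iff_exists.mp hc'
    have hget : d.getD k 0 = v := PySem.Dict.getD_of_get?_eq_some d 0 hg
    have hmem : (k, v) ∈ d.items := PySem.Dict.mem_items_of_get?_eq_some d hg
    rw [PySem.Dict.items_insert_of_contains d _ hc, hget]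
    exact pv_sum_replace f d.items k v w (by simpa [PySem.Dict.keys] using hnd) hmem
  · rw [PySem.Dict.items_insert_of_not_contains d _ (by simpa using hc),
        PySem.Dict.getD_of_not_contains d 0 (by simpa using hc)]
    simp

theorem pv_group (index : List (String × Int)) (l : List (List Char)) :
    ∀ (d : PySem.Dict String Int), d.keys.Nodup →
    ((l.foldl (fun (counts : PySem.Dict String Int) token =>
        counts.insert (String.ofList (token.filter PySem.Chars.isalpha))
          (counts.getD (String.ofList (token.filter PySem.Chars.isalpha)) 0 +
            (if token.filter PySem.Chars.isdigit ≠ [] then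
              (PySem.Int.ofChars? (token.filter PySem.Chars.isdigit)).getD 0 else 1))) d).items.map
      (fun p => (PySem.Dict.mk index).getD p.1 0 * p.2)).sum
    = (d.items.map (fun p => (PySem.Dict.mk index).getD p.1 0 * p.2)).sum + (l.map (pvTerm index)).sum := by
  induction l with
  | nil => intro d _; simp
  | cons t l ih =>
    intro d hnd
    simp only [List.foldl_cons, List.map_cons, List.sum_cons]
    rw [ih _ (PySem.Dict.nodup_keys_insert d _ _ hnd),
        pv_sum_items_insert (fun a => (PySem.Dict.mk index).getD a 0) d hnd]
    simp [pvTerm]; ring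

theorem pv_B_sum (molecule : String) (index : List (String × Int)) :
    molecularmass_alt molecule index
    = ((PySem.Chars.splitOn molecule.toList ['-']).map (pvTerm index)).sum := by
  unfold molecularmass_alt
  rw [pv_group index _ PySem.Dict.empty PySem.Dict.nodup_keys_empty]
  simp [PySem.Dict.empty]

-- ===== VERDICT (by name: the statement is the Claim_ definition above) =====
theorem molecularmass_spec : Claim_equal_molecularmass := by
  intro molecule index _ _
  unfold Spec_molecularmass molecularmass
  rw [pv_B_sum, pv_A_sum]
  simp
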